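-- pv_equiv track=rewrite | github.com/Jamidd/RTHS-with-LTLf-Goals | Code/LTLparser/functions/functions.py | add_a
-- ===== SOURCE A (Python) =====
-- def add_a(formula):
--     reserved = set(['&', '|', '~', '!', '-', '<', '>'])
--     cont = False
--     ret = ''
--     for l in formula:
--         if l in reserved:
--             cont = False
--         elif not cont:
--             ret += '@'
--             cont = True
--         ret += l
--     return ret
-- ===== SOURCE B (Python) =====
-- def add_a(formula):
--     reserved = '&|~!<>-'
--     out = []
--     i, n = 0, len(formula)
--     while i < n:
--         if formula[i] in reserved:
--             out.append(formula[i])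
--             i += 1
--         else:
--             j = i
--             while j < n and formula[j] not in reserved:
--                 j += 1
--             out.append('@' + formula[i:j])
--             i = j
--     return ''.join(out)
-- ===== Notes on version B (the rewrite author's own statement) =====
-- stated objective: alternative
-- what changed: Replaces the per-character loop with a 'cont' boolean flag by a run scanner that finds each maximal run of non-reserved characters and emits it whole with a single '@' prefix, so no per-character state flag is maintained.
import Mathlib
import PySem

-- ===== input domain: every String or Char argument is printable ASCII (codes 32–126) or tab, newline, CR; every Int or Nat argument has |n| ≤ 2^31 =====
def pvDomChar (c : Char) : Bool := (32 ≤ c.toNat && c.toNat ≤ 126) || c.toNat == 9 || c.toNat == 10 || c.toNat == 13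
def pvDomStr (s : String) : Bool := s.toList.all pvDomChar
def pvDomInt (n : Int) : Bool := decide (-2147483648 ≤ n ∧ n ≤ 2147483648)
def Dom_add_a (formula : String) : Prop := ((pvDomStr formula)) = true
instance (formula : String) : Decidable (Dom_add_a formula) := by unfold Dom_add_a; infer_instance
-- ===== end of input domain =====

-- B replaces A's per-character loop with a `cont` flag by a maximal-run scanner that
-- emits each run of non-reserved characters whole with one '@' prefix (alternative, same cost).

-- ===== PORT A =====
def pvIsRes (c : Char) : Bool :=
  c == '&' || c == '|' || c == '~' || c == '!' || c == '-' || c == '<' || c == '>'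

-- one iteration of A's loop: state = (cont, ret)
def pvStepA (s : Bool × List Char) (l : Char) : Bool × List Char :=
  if pvIsRes l then (false, s.2 ++ [l])
  else if s.1 = false then (true, (s.2 ++ ['@']) ++ [l])
  else (s.1, s.2 ++ [l])

def add_a (formula : String) : String :=
  String.mk ((formula.toList.foldl pvStepA (false, [])).2)

-- ===== PORT B =====
-- B's outer while loop: reserved char copied as is; otherwise the maximal run of
-- non-reserved chars (formula[i:j]) is emitted with a single '@' prefix.
def pvAltGo : List Char → List Char
  | [] => []
  | c :: rest =>
    if pvIsRes c then c :: pvAltGo rest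
    else '@' :: c :: (rest.takeWhile (fun x => !pvIsRes x) ++
                      pvAltGo (rest.dropWhile (fun x => !pvIsRes x)))
termination_by l => l.length
decreasing_by
  · simp
  · simpa using Nat.lt_succ_of_le (List.length_dropWhile_le _ _)

def add_a_alt (formula : String) : String := String.mk (pvAltGo formula.toList)

-- ===== PRECONDITION & SPEC =====
def Spec_add_a (formula : String) (out : String) : Prop := out = add_a_alt formula
instance (formula : String) (out : String) : Decidable (Spec_add_a formula out) := by unfold Spec_add_a; infer_instance

-- ===== CLAIM (what is proved, stated in full; the proofs are below) =====
def Claim_equal_add_a : Prop := ∀ (formula : String), Dom_add_a formula → Spec_add_a formula (add_a formula)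

-- ===== LEMMAS AND PROOFS =====
-- what A's loop appends from the rest of the input, given the current `cont` flag
def pvF : Bool → List Char → List Char
  | _, [] => []
  | cont, c :: rest =>
    if pvIsRes c then c :: pvF false rest
    else if cont then c :: pvF true rest
    else '@' :: c :: pvF true rest

theorem pvFoldA_eq (xs : List Char) : ∀ (cont : Bool) (acc : List Char),
    (xs.foldl pvStepA (cont, acc)).2 = acc ++ pvF cont xs := by
  induction xs with
  | nil => intro cont acc; simp [pvF]
  | cons c rest ih =>
    intro cont acc
    by_cases h : pvIsRes c = true
    · simp [pvStepA, h, pvF, ih]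
    · cases cont <;> simp [pvStepA, h, pvF, ih]

theorem pvF_true (xs : List Char) :
    pvF true xs = xs.takeWhile (fun x => !pvIsRes x) ++
      pvF false (xs.dropWhile (fun x => !pvIsRes x)) := by
  induction xs with
  | nil => simp [pvF]
  | cons c rest ih =>
    by_cases h : pvIsRes c = true
    · simp [pvF, h, List.takeWhile, List.dropWhile]
    · simp [pvF, h, List.takeWhile, List.dropWhile, ih]

theorem pvAltGo_eq_F (xs : List Char) : pvAltGo xs = pvF false xs := by
  induction xs using pvAltGo.induct with
  | case1 => simp [pvAltGo, pvF]
  | case2 c rest h ih => simp [pvAltGo, pvF, h, ih]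
  | case3 c rest h ih => simp [pvAltGo, pvF, h, ih, ← pvF_true]

-- ===== VERDICT (by name: the statement is the Claim_ definition above) =====
theorem add_a_spec : Claim_equal_add_a := by
  intro formula _
  unfold Spec_add_a add_a add_a_alt
  rw [pvFoldA_eq, pvAltGo_eq_F]
  simp
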